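-- pv_equiv track=rewrite | github.com/hipotures/mdm | scripts/ml/versions/version_5.py | create_cv_spinner
-- ===== SOURCE A (Python) =====
-- def create_cv_spinner(current_fold: int, total_folds: int, spinner_type: str = 'blocks') -> str:
--     """Create aesthetic CV progress spinner: ▰▰▱ (for CV=3, showing 2 done, 1 current)"""
--     symbols = {
--         'blocks': ('▰', '▱'),
--         'diamonds': ('◆', '◇'),
--         'stars': ('★', '☆'),
--         'circles': ('⚫', '⚪'),
--         'squares': ('■', '□'),
--         'dots': ('●', '○'),
--         'triangles': ('▲', '△')
--     }
--     filled, empty = symbols.get(spinner_type, ('▰', '▱'))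
--
--     spinner = ""
--     for i in range(total_folds):
--         if i < current_fold:
--             spinner += filled  # Completed
--         elif i == current_fold:
--             spinner += filled  # Current (also filled to show progress)
--         else:
--             spinner += empty  # Pending
--     return spinner
-- ===== SOURCE B (Python) =====
-- def create_cv_spinner(current_fold: int, total_folds: int, spinner_type: str = 'blocks') -> str:
--     """Closed form: clamp the filled count, then use string repetition (no loop)."""
--     symbols = {
--         'blocks': ('▰', '▱'),
--         'diamonds': ('◆', '◇'),
--         'stars': ('★', '☆'),
--         'circles': ('⚫', '⚪'),
--         'squares': ('■', '□'),
--         'dots': ('●', '○'),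
--         'triangles': ('▲', '△')
--     }
--     filled, empty = symbols.get(spinner_type, ('▰', '▱'))
--     n = max(0, min(current_fold + 1, total_folds))
--     return filled * n + empty * (total_folds - n)
-- ===== Notes on version B (the rewrite author's own statement) =====
-- stated objective: simpler
-- what changed: Replaced the per-index loop with branch-per-character concatenation by a closed-form clamped count n = max(0, min(current_fold+1, total_folds)) and string repetition filled*n + empty*(total_folds-n).
import Mathlib
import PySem

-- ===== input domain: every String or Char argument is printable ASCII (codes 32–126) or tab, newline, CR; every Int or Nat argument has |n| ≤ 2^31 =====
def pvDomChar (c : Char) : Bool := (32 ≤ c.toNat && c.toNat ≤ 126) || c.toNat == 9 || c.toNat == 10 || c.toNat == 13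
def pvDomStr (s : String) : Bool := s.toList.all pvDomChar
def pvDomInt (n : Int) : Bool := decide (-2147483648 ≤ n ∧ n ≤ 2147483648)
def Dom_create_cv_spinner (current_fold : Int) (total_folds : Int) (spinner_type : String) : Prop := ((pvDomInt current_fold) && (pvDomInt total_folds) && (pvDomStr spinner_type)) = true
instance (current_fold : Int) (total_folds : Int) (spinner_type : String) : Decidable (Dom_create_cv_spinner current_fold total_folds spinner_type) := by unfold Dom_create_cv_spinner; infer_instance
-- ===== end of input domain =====

-- B replaces the per-symbol loop by a clamped closed-form count plus string repetition (simpler).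

-- the symbols dict, common to both Pythons
def pvSymbols : PySem.Dict String (String × String) :=
  ((((((PySem.Dict.empty.insert "blocks" ("▰", "▱")).insert
      "diamonds" ("◆", "◇")).insert
      "stars" ("★", "☆")).insert
      "circles" ("⚫", "⚪")).insert
      "squares" ("■", "□")).insert
      "dots" ("●", "○")).insert
      "triangles" ("▲", "△")

-- ===== PORT A =====
-- Python string concatenation is ported exactly as List Char append; String.ofList at the end.
def create_cv_spinner (current_fold : Int) (total_folds : Int) (spinner_type : String) : String :=
  let p := pvSymbols.getD spinner_type ("▰", "▱")
  let filled := p.1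
  let empty := p.2
  let spinner := (PySem.List.pyRange 0 total_folds 1).foldl
    (fun acc i =>
      if i < current_fold then acc ++ filled.toList
      else if i = current_fold then acc ++ filled.toList
      else acc ++ empty.toList) ([] : List Char)
  String.ofList spinner

-- ===== PORT B =====
def create_cv_spinner_alt (current_fold : Int) (total_folds : Int) (spinner_type : String) : String :=
  let p := pvSymbols.getD spinner_type ("▰", "▱")
  let n : Int := max 0 (min (current_fold + 1) total_folds)
  String.ofList (PySem.List.pyRepeat p.1.toList n ++ PySem.List.pyRepeat p.2.toList (total_folds - n))

-- ===== PRECONDITION & SPEC =====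
def Spec_create_cv_spinner (current_fold : Int) (total_folds : Int) (spinner_type : String) (out : String) : Prop := out = create_cv_spinner_alt current_fold total_folds spinner_type
instance (current_fold : Int) (total_folds : Int) (spinner_type : String) (out : String) : Decidable (Spec_create_cv_spinner current_fold total_folds spinner_type out) := by unfold Spec_create_cv_spinner; infer_instance

-- ===== CLAIM (what is proved, stated in full; the proofs are below) =====
def Claim_equal_create_cv_spinner : Prop := ∀ (current_fold : Int) (total_folds : Int) (spinner_type : String), Dom_create_cv_spinner current_fold total_folds spinner_type → Spec_create_cv_spinner current_fold total_folds spinner_type (create_cv_spinner current_fold total_folds spinner_type)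

-- ===== LEMMAS AND PROOFS =====

theorem pv_loop_eq (f e : List Char) (cf : Int) (k : Nat) :
    (((List.range k).map (fun j : Nat => (j : Int)))).foldl
      (fun acc i =>
        if i < cf then acc ++ f
        else if i = cf then acc ++ f
        else acc ++ e) ([] : List Char)
    = (List.replicate (min k (cf + 1).toNat) f).flatten
      ++ (List.replicate (k - min k (cf + 1).toNat) e).flatten := by
  induction k with
  | zero => simp
  | succ k ih =>
    rw [List.range_succ, List.map_append, List.foldl_append, ih]
    simp only [List.map_cons, List.map_nil, List.foldl_cons, List.foldl_nil]
    by_cases h : (k : Int) < cf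
    · have h1 : min k (cf + 1).toNat = k := by omega
      have h2 : min (k + 1) (cf + 1).toNat = k + 1 := by omega
      rw [if_pos h, h1, h2]
      simp [List.replicate_succ' , List.flatten_append]
    · by_cases h' : (k : Int) = cf
      · have h1 : min k (cf + 1).toNat = k := by omega
        have h2 : min (k + 1) (cf + 1).toNat = k + 1 := by omega
        rw [if_neg h, if_pos h', h1, h2]
        simp [List.replicate_succ', List.flatten_append]
      · have hk : (cf + 1).toNat ≤ k := by omega
        have h1 : min k (cf + 1).toNat = (cf + 1).toNat := by omega
        have h2 : min (k + 1) (cf + 1).toNat = (cf + 1).toNat := by omega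
        have h3 : k + 1 - (cf + 1).toNat = (k - (cf + 1).toNat) + 1 := by omega
        rw [if_neg h, if_neg h', h1, h2, h3]
        simp [List.replicate_succ', List.flatten_append]

-- ===== VERDICT (by name: the statement is the Claim_ definition above) =====
theorem create_cv_spinner_spec : Claim_equal_create_cv_spinner := by
  intro cf tf st _
  unfold Spec_create_cv_spinner create_cv_spinner create_cv_spinner_alt
  simp only [PySem.List.pyRange_one, PySem.List.pyRepeat, zero_add, sub_zero]
  rw [pv_loop_eq]
  have h1 : min tf.toNat (cf + 1).toNat = (max 0 (min (cf + 1) tf)).toNat := by omega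
  rw [h1]
  have h2 : tf.toNat - (max 0 (min (cf + 1) tf)).toNat
      = (tf - max 0 (min (cf + 1) tf)).toNat := by omega
  rw [h2]
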